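-- pv_equiv track=rewrite | github.com/amitkandari219/trading-system | signals/structural/dii_put_floor.py | _find_next_put_cluster
-- ===== SOURCE A (Python) =====
-- from typing import Any, Dict, List, Optional, Tuple
--
-- MIN_DII_PUT_OI = 2_000_000          # 20 lakh contracts
--
-- def _safe_int(val: Any, default: int = 0) -> int:
--     """Safely cast to int."""
--     if val is None:
--         return default
--     try:
--         return int(val)
--     except (TypeError, ValueError):
--         return default
--
-- def _find_next_put_cluster(
--     dii_put_oi_by_strike: Dict[int, int],
--     floor_strike: int,
--     min_oi: int = MIN_DII_PUT_OI,
-- ) -> Optional[int]: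
--     """
--     Find the next significant put OI cluster below the broken floor.
--
--     Used to set a SHORT target when the floor breaks.
--
--     Returns
--     -------
--     Next lower strike with OI ≥ min_oi, or None.
--     """
--     candidates = []
--     for strike, oi in dii_put_oi_by_strike.items():
--         strike = _safe_int(strike)
--         oi = _safe_int(oi)
--         if strike < floor_strike and oi >= min_oi:
--             candidates.append((strike, oi))
--
--     if not candidates:
--         return None
--
--     # Pick the highest strike below the floor (nearest cluster)
--     candidates.sort(key=lambda x: x[0], reverse=True)
--     return candidates[0][0]
-- ===== SOURCE B (Python) =====
-- MIN_DII_PUT_OI = 2_000_000          # 20 lakh contracts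
--
--
-- def _safe_int(val, default=0):
--     """Safely cast to int."""
--     if val is None:
--         return default
--     try:
--         return int(val)
--     except (TypeError, ValueError):
--         return default
--
--
-- def _find_next_put_cluster(dii_put_oi_by_strike, floor_strike, min_oi=MIN_DII_PUT_OI):
--     """Single-pass running-max scan: no candidates list, no sort."""
--     best = None
--     for strike, oi in dii_put_oi_by_strike.items():
--         strike = _safe_int(strike)
--         oi = _safe_int(oi)
--         if strike < floor_strike and oi >= min_oi:
--             if best is None or strike > best:
--                 best = strike
--     return best
-- ===== Notes on version B (the rewrite author's own statement) =====
-- stated objective: simpler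
-- what changed: Replaced the build-candidates-then-sort-descending-then-take-first strategy with a single pass that tracks the running maximum qualifying strike in one variable.
import Mathlib
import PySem

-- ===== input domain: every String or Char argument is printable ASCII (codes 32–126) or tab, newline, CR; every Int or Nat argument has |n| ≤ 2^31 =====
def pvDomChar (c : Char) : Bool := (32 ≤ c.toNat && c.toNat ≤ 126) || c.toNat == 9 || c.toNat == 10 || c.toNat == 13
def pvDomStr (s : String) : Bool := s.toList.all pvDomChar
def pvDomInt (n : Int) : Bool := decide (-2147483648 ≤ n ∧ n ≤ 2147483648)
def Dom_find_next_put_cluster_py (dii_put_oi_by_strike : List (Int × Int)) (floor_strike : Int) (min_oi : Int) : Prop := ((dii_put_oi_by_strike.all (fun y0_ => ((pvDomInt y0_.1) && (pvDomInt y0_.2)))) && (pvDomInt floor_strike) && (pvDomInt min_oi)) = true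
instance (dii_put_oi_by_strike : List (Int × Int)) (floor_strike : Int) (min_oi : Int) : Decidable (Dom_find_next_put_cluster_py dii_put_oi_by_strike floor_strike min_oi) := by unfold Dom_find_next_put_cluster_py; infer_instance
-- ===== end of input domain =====

-- B replaces A's build-candidates / sort-descending / take-first strategy with a single-pass
-- running-max scan (objective: simpler).


-- ===== PORT A =====
-- _safe_int applied to an int is the identity, so on the Int × Int items of the
-- association list the casts disappear.
def find_next_put_cluster_py (dii_put_oi_by_strike : List (Int × Int)) (floor_strike : Int) (min_oi : Int) : Option Int :=
  let candidates := dii_put_oi_by_strike.foldl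
    (fun acc p => if p.1 < floor_strike ∧ p.2 ≥ min_oi then acc ++ [(p.1, p.2)] else acc) []
  if candidates = [] then none
  else
    match PySem.List.sorted candidates (fun x => x.1) true with
    | [] => none          -- unreachable: candidates ≠ []
    | m :: _ => some m.1  -- candidates[0][0] after the reverse sort

-- ===== PORT B =====
def find_next_put_cluster_py_alt (dii_put_oi_by_strike : List (Int × Int)) (floor_strike : Int) (min_oi : Int) : Option Int :=
  dii_put_oi_by_strike.foldl
    (fun best p =>
      if p.1 < floor_strike ∧ p.2 ≥ min_oi then
        match best with
        | none => some p.1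
        | some b => if p.1 > b then some p.1 else some b
      else best)
    none

-- ===== PRECONDITION & SPEC =====
def Spec_find_next_put_cluster_py (dii_put_oi_by_strike : List (Int × Int)) (floor_strike : Int) (min_oi : Int) (out : Option Int) : Prop := out = find_next_put_cluster_py_alt dii_put_oi_by_strike floor_strike min_oi
instance (dii_put_oi_by_strike : List (Int × Int)) (floor_strike : Int) (min_oi : Int) (out : Option Int) : Decidable (Spec_find_next_put_cluster_py dii_put_oi_by_strike floor_strike min_oi out) := by unfold Spec_find_next_put_cluster_py; infer_instance

-- ===== CLAIM (what is proved, stated in full; the proofs are below) =====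
def Claim_equal_find_next_put_cluster_py : Prop := ∀ (dii_put_oi_by_strike : List (Int × Int)) (floor_strike : Int) (min_oi : Int), Dom_find_next_put_cluster_py dii_put_oi_by_strike floor_strike min_oi → Spec_find_next_put_cluster_py dii_put_oi_by_strike floor_strike min_oi (find_next_put_cluster_py dii_put_oi_by_strike floor_strike min_oi)

-- ===== LEMMAS AND PROOFS =====

-- B's step, once a qualifying element has been seen, computes a running max.
theorem pvAltFoldSome (c : List (Int × Int)) (b : Int) :
    c.foldl (fun best p =>
        match best with
        | none => some p.1
        | some b => if p.1 > b then some p.1 else some b) (some b)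
      = some ((c.map Prod.fst).foldl max b) := by
  induction c generalizing b with
  | nil => rfl
  | cons p c ih =>
      simp only [List.foldl_cons, List.map_cons]
      by_cases h : p.1 > b
      · rw [if_pos h, ih, max_eq_right (le_of_lt h)]
      · rw [if_neg h, ih, max_eq_left (by omega : p.1 ≤ b)]

-- B's fold over the filtered list is max? of the strikes.
theorem pvAltFoldMax (c : List (Int × Int)) :
    c.foldl (fun best p =>
        match best with
        | none => some p.1
        | some b => if p.1 > b then some p.1 else some b) none
      = (c.map Prod.fst).max? := by
  cases c with
  | nil => rfl
  | cons p c =>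
      simp only [List.foldl_cons, List.map_cons, List.max?_cons']
      exact pvAltFoldSome c p.1

theorem find_next_put_cluster_py_spec : Claim_equal_find_next_put_cluster_py := by
  intro l floor min _
  unfold Spec_find_next_put_cluster_py find_next_put_cluster_py find_next_put_cluster_py_alt
  rw [PySem.List.foldl_append_ite_eq_filter, PySem.List.foldl_ite_eq_foldl_filter]
  simp only [List.nil_append]
  set c := l.filter (fun p => decide (p.1 < floor ∧ p.2 ≥ min)) with hc
  rw [pvAltFoldMax]
  by_cases hnil : c = []
  · simp [hnil]
  · rw [if_neg hnil]
    rcases hs : PySem.List.sorted c (fun x => x.1) true with _ | ⟨m, t⟩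
    · have hp := PySem.List.sorted_perm (xs := c) (key := fun x => x.1) (rev := true)
      rw [hs] at hp
      exact absurd hp.symm.eq_nil hnil
    · have hmem : m ∈ c := by
        have := PySem.List.sorted_perm (xs := c) (key := fun x => x.1) (rev := true)
        rw [hs] at this
        exact this.mem_iff.mp (List.mem_cons_self ..)
      have hge := PySem.List.key_head_sorted_rev_ge (xs := c) (key := fun x => x.1) hs
      symm
      rw [List.max?_eq_some_iff]
      refine ⟨List.mem_map_of_mem hmem, ?_⟩
      intro b hb
      rcases List.mem_map.mp hb with ⟨y, hy, rfl⟩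
      exact hge y hy
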